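-- pv_equiv track=rewrite | github.com/junyong1111/codetree-TILs | 250410/고대 문명 유적 탐사/ancient-ruin-exploration.py | evaluate_artifacts
-- ===== SOURCE A (Python) =====
-- from collections import deque
--
-- N = 5  # 그리드 크기는 항상 5x5
--
-- class Point:
--     def __init__(self, x, y):
--         self.x = x
--         self.y = y
--
--     def __eq__(self, other):
--         return self.x == other.x and self.y == other.y
--
--     def __repr__(self):
--         return f"Point({self.x}, {self.y})"
--
-- def is_valid(x, y):
--     return 0 <= x < N and 0 <= y < N
--
-- def bfs(x, y, arr, visited):
--     value = arr[y][x]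
--     queue = deque([(x, y)])
--     visited[y][x] = True
--     connected = [Point(x, y)]
--
--     dx = [0, 1, 0, -1]  # 동, 남, 서, 북
--     dy = [1, 0, -1, 0]
--
--     while queue:
--         cx, cy = queue.popleft()
--
--         for i in range(4):
--             nx, ny = cx + dx[i], cy + dy[i]
--             if is_valid(nx, ny) and not visited[ny][nx] and arr[ny][nx] == value:
--                 visited[ny][nx] = True
--                 queue.append((nx, ny))
--                 connected.append(Point(nx, ny))
--
--     # 3개 이상 연결된 경우에만 반환
--     if len(connected) >= 3:
--         return connected
--     return None
--
-- def evaluate_artifacts(arr):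
--     count = 0
--     visited = [[False for _ in range(N)] for _ in range(N)]
--
--     for y in range(N):
--         for x in range(N):
--             if not visited[y][x]:
--                 connected = bfs(x, y, arr, visited)
--                 if connected:
--                     count += len(connected)
--
--     return count
-- ===== SOURCE B (Python) =====
-- N = 5  # grid is always 5x5
--
-- def evaluate_artifacts(arr):
--     # per-cell fixed-point saturation: grow each cell's region to closure, then
--     # count the cells whose region has at least 3 cells
--     def grow(cells):
--         return [(x, y)
--                 for y in range(N) for x in range(N)
--                 if (x, y) in cells
--                 or any(0 <= nx < N and 0 <= ny < N
--                        and (nx, ny) in cells and arr[ny][nx] == arr[y][x]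
--                        for nx, ny in ((x, y + 1), (x + 1, y), (x, y - 1), (x - 1, y)))]
--
--     def region(x, y):
--         cells = [(x, y)]
--         for _ in range(N * N):
--             cells = grow(cells)
--         return cells
--
--     return sum(1 for y in range(N) for x in range(N) if len(region(x, y)) >= 3)
-- ===== Notes on version B (the rewrite author's own statement) =====
-- stated objective: alternative
-- what changed: Replaces the shared-visited BFS flood fill (queue + mutable visited matrix) by a per-cell fixed-point saturation: each cell's same-value region is grown to closure by repeated neighbourhood expansion, and the answer counts the cells whose region has size >= 3 instead of summing component lengths.
import Mathlib
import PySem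

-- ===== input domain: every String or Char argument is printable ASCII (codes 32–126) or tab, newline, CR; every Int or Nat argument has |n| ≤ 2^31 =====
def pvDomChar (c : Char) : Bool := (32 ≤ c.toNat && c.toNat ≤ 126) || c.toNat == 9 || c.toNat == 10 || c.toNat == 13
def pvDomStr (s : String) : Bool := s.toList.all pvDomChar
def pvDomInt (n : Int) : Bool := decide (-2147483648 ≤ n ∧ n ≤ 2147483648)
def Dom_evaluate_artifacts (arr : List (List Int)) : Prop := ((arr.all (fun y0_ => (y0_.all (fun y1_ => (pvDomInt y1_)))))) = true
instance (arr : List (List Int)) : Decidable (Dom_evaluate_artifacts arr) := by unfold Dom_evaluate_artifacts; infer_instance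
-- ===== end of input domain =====

-- B replaces A's shared-visited BFS flood fill by a per-cell fixed-point
-- saturation of each cell's region, counting cells in regions of size ≥ 3
-- (alternative decomposition, similar cost on the fixed 5×5 grid).

-- ===== PORT A =====

-- arr[y][x]; only evaluated under 0 ≤ x,y (guarded by is_valid / loop bounds)
def cellVal (arr : List (List Int)) (x y : Int) : Int :=
  (arr.getD y.toNat []).getD x.toNat 0

-- is_valid(x, y)
def isValid (x y : Int) : Bool :=
  decide (0 ≤ x) && decide (x < 5) && decide (0 ≤ y) && decide (y < 5)

-- visited[y][x] (read); only used with 0 ≤ x,y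
def vget (vis : List (List Bool)) (x y : Int) : Bool :=
  (vis.getD y.toNat []).getD x.toNat false

-- visited[y][x] = True
def vset (vis : List (List Bool)) (x y : Int) : List (List Bool) :=
  vis.set y.toNat ((vis.getD y.toNat []).set x.toNat true)

-- zip of dx = [0,1,0,-1], dy = [1,0,-1,0]
def dirsA : List (Int × Int) := [(0, 1), (1, 0), (0, -1), (-1, 0)]

-- body of `for i in range(4)` for popped cell (cx, cy); state = (queue, visited, connected)
def visitDirs (arr : List (List Int)) (value cx cy : Int)
    (st : List (Int × Int) × List (List Bool) × List (Int × Int)) :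
    List (Int × Int) × List (List Bool) × List (Int × Int) :=
  dirsA.foldl (fun st d =>
    let nx := cx + d.1
    let ny := cy + d.2
    if isValid nx ny && !(vget st.2.1 nx ny) && (cellVal arr nx ny == value) then
      (st.1 ++ [(nx, ny)], vset st.2.1 nx ny, st.2.2 ++ [(nx, ny)])
    else st) st

-- `while queue:` (fuel only makes the recursion total; 64 > 2*25 + 1 ≥ the loop measure)
def bfsLoop (arr : List (List Int)) (value : Int) :
    Nat → List (Int × Int) → List (List Bool) → List (Int × Int) →
    List (List Bool) × List (Int × Int)
  | 0, _, vis, conn => (vis, conn)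
  | _ + 1, [], vis, conn => (vis, conn)
  | fuel + 1, (cx, cy) :: rest, vis, conn =>
      let st := visitDirs arr value cx cy (rest, vis, conn)
      bfsLoop arr value fuel st.1 st.2.1 st.2.2

-- bfs(x, y, arr, visited); returns (updated visited, connected-or-None)
def bfsA (arr : List (List Int)) (x y : Int) (vis : List (List Bool)) :
    List (List Bool) × Option (List (Int × Int)) :=
  let value := cellVal arr x y
  let vis1 := vset vis x y
  let r := bfsLoop arr value 64 [(x, y)] vis1 [(x, y)]
  (r.1, if 3 ≤ r.2.length then some r.2 else none)

def evaluate_artifacts (arr : List (List Int)) : Int :=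
  let init : Int × List (List Bool) := (0, List.replicate 5 (List.replicate 5 false))
  let res := (PySem.List.pyRange 0 5 1).foldl (fun st y =>
    (PySem.List.pyRange 0 5 1).foldl (fun st x =>
      if !(vget st.2 x y) then
        let r := bfsA arr x y st.2
        match r.2 with
        | some c => (st.1 + (c.length : Int), r.1)
        | none => (st.1, r.1)
      else st) st) init
  res.1

-- ===== PORT B =====

-- the four neighbour candidates ((x, y+1), (x+1, y), (x, y-1), (x-1, y))
def nbrs (x y : Int) : List (Int × Int) := [(x, y + 1), (x + 1, y), (x, y - 1), (x - 1, y)]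

-- the comprehension's filter condition for cell (x, y)
def growCond (arr : List (List Int)) (cells : List (Int × Int)) (x y : Int) : Bool :=
  decide ((x, y) ∈ cells) ||
    (nbrs x y).any (fun n =>
      decide (0 ≤ n.1) && decide (n.1 < 5) && decide (0 ≤ n.2) && decide (n.2 < 5) &&
      decide (n ∈ cells) && (cellVal arr n.1 n.2 == cellVal arr x y))

-- grow(cells): one parallel expansion step, produced in scan order
def growB (arr : List (List Int)) (cells : List (Int × Int)) : List (Int × Int) :=
  (PySem.List.pyRange 0 5 1).flatMap (fun y =>
    (PySem.List.pyRange 0 5 1).flatMap (fun x =>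
      if growCond arr cells x y then [(x, y)] else []))

-- region(x, y): saturate for N*N = 25 rounds
def regionB (arr : List (List Int)) (x y : Int) : List (Int × Int) :=
  (List.range 25).foldl (fun cells _ => growB arr cells) [(x, y)]

def evaluate_artifacts_alt (arr : List (List Int)) : Int :=
  (PySem.List.pyRange 0 5 1).foldl (fun acc y =>
    (PySem.List.pyRange 0 5 1).foldl (fun acc x =>
      acc + (if 3 ≤ (regionB arr x y).length then 1 else 0)) acc) 0

-- ===== PRECONDITION & SPEC =====

-- Pre_ excludes exactly the grids on which A raises IndexError: fewer than 5 rows,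
-- or one of the first 5 rows shorter than 5 (A indexes arr[y][x] for all 0 ≤ x,y < 5).
def Pre_evaluate_artifacts (arr : List (List Int)) : Prop :=
  5 ≤ arr.length ∧ ∀ row ∈ arr.take 5, 5 ≤ row.length
instance (arr : List (List Int)) : Decidable (Pre_evaluate_artifacts arr) := by
  unfold Pre_evaluate_artifacts; infer_instance

def pvWitness_evaluate_artifacts : List (List Int) :=
  [[1, 1, 2, 2, 2], [1, 3, 3, 3, 2], [4, 4, 5, 3, 2], [4, 4, 5, 5, 5], [4, 6, 7, 7, 5]]

def Spec_evaluate_artifacts (arr : List (List Int)) (out : Int) : Prop := out = evaluate_artifacts_alt arr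
instance (arr : List (List Int)) (out : Int) : Decidable (Spec_evaluate_artifacts arr out) := by unfold Spec_evaluate_artifacts; infer_instance

-- ===== CLAIM (what is proved, stated in full; the proofs are below) =====
def Claim_equal_evaluate_artifacts : Prop := ∀ (arr : List (List Int)), Dom_evaluate_artifacts arr → Pre_evaluate_artifacts arr → Spec_evaluate_artifacts arr (evaluate_artifacts arr)

-- ===== LEMMAS AND PROOFS =====

-- ---------- shared abstract layer ----------

def validP (p : Int × Int) : Bool := isValid p.1 p.2

-- scan order of both programs: (x, y) for y in 0..4, x in 0..4
def scanList : List (Int × Int) :=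
  (PySem.List.pyRange 0 5 1).flatMap (fun y => (PySem.List.pyRange 0 5 1).map (fun x => (x, y)))

lemma mem_scanList {p : Int × Int} : p ∈ scanList ↔ validP p = true := by
  obtain ⟨a, b⟩ := p
  simp only [scanList, List.mem_flatMap, List.mem_map, PySem.List.mem_pyRange_one, validP,
    isValid, Bool.and_eq_true, decide_eq_true_eq, Prod.mk.injEq]
  constructor
  · rintro ⟨y, hy, x, hx, hxa, hyb⟩; omega
  · rintro ⟨⟨⟨h1, h2⟩, h3⟩, h4⟩; exact ⟨b, ⟨h3, h4⟩, a, ⟨h1, h2⟩, rfl, rfl⟩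

lemma nodup_scanList : scanList.Nodup := by decide

def stepOK (arr : List (List Int)) (p q : Int × Int) : Bool :=
  validP p && validP q && decide (q ∈ nbrs p.1 p.2) && (cellVal arr q.1 q.2 == cellVal arr p.1 p.2)

lemma stepOK_iff {arr : List (List Int)} {p q : Int × Int} :
    stepOK arr p q = true ↔
      validP p = true ∧ validP q = true ∧ q ∈ nbrs p.1 p.2 ∧
        cellVal arr q.1 q.2 = cellVal arr p.1 p.2 := by
  simp [stepOK, and_assoc]

lemma mem_nbrs_symm {p q : Int × Int} (h : q ∈ nbrs p.1 p.2) : p ∈ nbrs q.1 q.2 := by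
  obtain ⟨a, b⟩ := p; obtain ⟨c, d⟩ := q
  simp [nbrs, Prod.ext_iff] at h ⊢
  omega

lemma stepOK_symm {arr : List (List Int)} {p q : Int × Int} (h : stepOK arr p q = true) :
    stepOK arr q p = true := by
  rw [stepOK_iff] at h ⊢
  exact ⟨h.2.1, h.1, mem_nbrs_symm h.2.2.1, h.2.2.2.symm⟩

lemma stepOK_validq {arr : List (List Int)} {p q : Int × Int} (h : stepOK arr p q = true) :
    validP q = true := (stepOK_iff.mp h).2.1

def ClosedF (arr : List (List Int)) (S : Finset (Int × Int)) : Prop :=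
  ∀ p ∈ S, ∀ q, stepOK arr p q = true → q ∈ S

-- ---------- B-side: growB is a filter of the scan list ----------

lemma flatMap_ite_singleton {α β : Type} (l : List α) (f : α → β) (P : β → Bool) :
    l.flatMap (fun x => if P (f x) then [f x] else []) = (l.map f).filter P := by
  induction l with
  | nil => rfl
  | cons a t ih => simp only [List.flatMap_cons, ih, List.map_cons, List.filter_cons]; split <;> simp

lemma flatMap_flatMap_filter (ly lx : List Int) (f : Int → Int → Bool) :
    ly.flatMap (fun y => lx.flatMap (fun x => if f x y then [((x, y) : Int × Int)] else []))
      = (ly.flatMap (fun y => lx.map (fun x => ((x, y) : Int × Int)))).filter (fun p => f p.1 p.2) := by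
  induction ly with
  | nil => rfl
  | cons a t ih =>
      simp only [List.flatMap_cons, List.filter_append, ih]
      congr 1
      exact flatMap_ite_singleton lx (fun x => (x, a)) (fun p => f p.1 p.2)

lemma growB_eq_filter (arr : List (List Int)) (cells : List (Int × Int)) :
    growB arr cells = scanList.filter (fun p => growCond arr cells p.1 p.2) := by
  exact flatMap_flatMap_filter _ _ (fun x y => growCond arr cells x y)

lemma mem_growB {arr : List (List Int)} {cells : List (Int × Int)} {q : Int × Int} :
    q ∈ growB arr cells ↔ validP q = true ∧ growCond arr cells q.1 q.2 = true := by
  rw [growB_eq_filter, List.mem_filter, mem_scanList]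

lemma nodup_growB (arr : List (List Int)) (cells : List (Int × Int)) :
    (growB arr cells).Nodup := by
  rw [growB_eq_filter]; exact nodup_scanList.filter _

lemma growCond_iff {arr : List (List Int)} {cells : List (Int × Int)} {q : Int × Int}
    (hq : validP q = true) :
    growCond arr cells q.1 q.2 = true ↔ (q ∈ cells ∨ ∃ p ∈ cells, stepOK arr p q = true) := by
  obtain ⟨a, b⟩ := q
  simp only [growCond, Bool.or_eq_true, decide_eq_true_eq, List.any_eq_true, Bool.and_eq_true,
    beq_iff_eq]
  constructor
  · rintro (h | ⟨n, hn, ⟨⟨⟨⟨⟨h1, h2⟩, h3⟩, h4⟩, h5⟩, h6⟩⟩)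
    · exact Or.inl h
    · refine Or.inr ⟨n, h5, stepOK_iff.mpr ⟨?_, hq, mem_nbrs_symm hn, h6.symm⟩⟩
      simp only [validP, isValid, Bool.and_eq_true, decide_eq_true_eq]
      exact ⟨⟨⟨h1, h2⟩, h3⟩, h4⟩
  · rintro (h | ⟨p, hp, hstep⟩)
    · exact Or.inl h
    · rw [stepOK_iff] at hstep
      obtain ⟨hvp, hvq, hnb, hval⟩ := hstep
      refine Or.inr ⟨p, mem_nbrs_symm hnb, ?_⟩
      simp only [validP, isValid, Bool.and_eq_true, decide_eq_true_eq] at hvp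
      refine ⟨⟨⟨⟨⟨?_, ?_⟩, ?_⟩, ?_⟩, hp⟩, hval.symm⟩ <;> tauto

-- membership in growB, semantically
lemma mem_growB' {arr : List (List Int)} {cells : List (Int × Int)} {q : Int × Int}
    (hcells : ∀ p ∈ cells, validP p = true) :
    q ∈ growB arr cells ↔ (q ∈ cells ∨ ∃ p ∈ cells, stepOK arr p q = true) := by
  rw [mem_growB]
  constructor
  · rintro ⟨hv, hc⟩; exact (growCond_iff hv).mp hc
  · rintro h
    have hv : validP q = true := by
      rcases h with h | ⟨p, hp, hs⟩
      · exact hcells _ h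
      · exact stepOK_validq hs
    exact ⟨hv, (growCond_iff hv).mpr h⟩


-- ---------- B-side: the saturation reaches the least closed superset ----------

def gIter (arr : List (List Int)) (s : Int × Int) (k : Nat) : List (Int × Int) :=
  (List.range k).foldl (fun c _ => growB arr c) [s]

lemma regionB_eq_gIter (arr : List (List Int)) (x y : Int) :
    regionB arr x y = gIter arr (x, y) 25 := rfl

lemma gIter_succ (arr : List (List Int)) (s : Int × Int) (k : Nat) :
    gIter arr s (k + 1) = growB arr (gIter arr s k) := by
  simp [gIter, List.range_succ]

lemma valid_gIter {arr : List (List Int)} {s : Int × Int} (hs : validP s = true) :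
    ∀ k, ∀ p ∈ gIter arr s k, validP p = true := by
  intro k
  cases k with
  | zero => intro p hp; simp [gIter] at hp; subst hp; exact hs
  | succ k => intro p hp; rw [gIter_succ] at hp; exact (mem_growB.mp hp).1

lemma subset_gIter_succ {arr : List (List Int)} {s : Int × Int} (hs : validP s = true)
    (k : Nat) : ∀ p ∈ gIter arr s k, p ∈ gIter arr s (k + 1) := by
  intro p hp
  rw [gIter_succ]
  exact (mem_growB' (valid_gIter hs k)).mpr (Or.inl hp)

lemma gIter_mono {arr : List (List Int)} {s : Int × Int} (hs : validP s = true)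
    {k m : Nat} (hkm : k ≤ m) : ∀ p ∈ gIter arr s k, p ∈ gIter arr s m := by
  induction m with
  | zero => intro p hp; simpa [Nat.le_zero.mp hkm] using hp
  | succ m ih =>
      rcases Nat.lt_or_ge k (m + 1) with h | h
      · intro p hp; exact subset_gIter_succ hs m p (ih (by omega) p hp)
      · have : k = m + 1 := by omega
        subst this; exact fun p hp => hp

lemma mem_self_gIter {arr : List (List Int)} {s : Int × Int} (hs : validP s = true) (k : Nat) :
    s ∈ gIter arr s k :=
  gIter_mono hs (Nat.zero_le k) s (by simp [gIter])

lemma growCond_congr {arr : List (List Int)} {c1 c2 : List (Int × Int)}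
    (h : ∀ p, p ∈ c1 ↔ p ∈ c2) (x y : Int) :
    growCond arr c1 x y = growCond arr c2 x y := by
  refine Bool.eq_iff_iff.mpr ?_
  simp only [growCond, Bool.or_eq_true, decide_eq_true_eq, List.any_eq_true, Bool.and_eq_true,
    beq_iff_eq, h]

lemma growB_congr {arr : List (List Int)} {c1 c2 : List (Int × Int)}
    (h : ∀ p, p ∈ c1 ↔ p ∈ c2) : growB arr c1 = growB arr c2 := by
  rw [growB_eq_filter, growB_eq_filter]
  exact List.filter_congr (fun p _ => growCond_congr h p.1 p.2)

lemma gIter_persist {arr : List (List Int)} {s : Int × Int} {k : Nat}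
    (h : ∀ p, p ∈ gIter arr s (k + 1) ↔ p ∈ gIter arr s k) :
    ∀ m, k + 1 ≤ m → gIter arr s m = gIter arr s (k + 1) := by
  intro m hm
  induction m with
  | zero => omega
  | succ m ih =>
      rcases Nat.lt_or_ge (k + 1) (m + 1) with hlt | hge
      · have hm' : gIter arr s m = gIter arr s (k + 1) := ih (by omega)
        calc gIter arr s (m + 1) = growB arr (gIter arr s m) := gIter_succ arr s m
          _ = growB arr (gIter arr s (k + 1)) := by rw [hm']
          _ = growB arr (gIter arr s k) := growB_congr h
          _ = gIter arr s (k + 1) := (gIter_succ arr s k).symm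
      · have : m + 1 = k + 1 := by omega
        rw [this]

lemma card_scanList_toFinset : scanList.toFinset.card = 25 := by decide

lemma exists_gIter_stab {arr : List (List Int)} {s : Int × Int} (hs : validP s = true) :
    ∃ k, k < 25 ∧ ∀ p, p ∈ gIter arr s (k + 1) ↔ p ∈ gIter arr s k := by
  by_contra hcon
  push Not at hcon
  have hstrict : ∀ k, k < 25 → (gIter arr s k).toFinset ⊂ (gIter arr s (k + 1)).toFinset := by
    intro k hk
    obtain ⟨p, hp⟩ := hcon k hk
    constructor
    · intro q hq
      rw [List.mem_toFinset] at hq ⊢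
      exact subset_gIter_succ hs k q hq
    · intro hsub
      rcases hp with ⟨h1, h2⟩ | ⟨h1, h2⟩
      · exact h2 (List.mem_toFinset.mp (hsub (List.mem_toFinset.mpr h1)))
      · exact h1 (subset_gIter_succ hs k p h2)
  have hcard : ∀ k, k ≤ 25 → k + 1 ≤ (gIter arr s k).toFinset.card := by
    intro k
    induction k with
    | zero =>
        intro _
        have : s ∈ (gIter arr s 0).toFinset := List.mem_toFinset.mpr (mem_self_gIter hs 0)
        exact Finset.card_pos.mpr ⟨s, this⟩
    | succ k ih =>
        intro hk
        have h1 := ih (by omega)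
        have h2 := Finset.card_lt_card (hstrict k (by omega))
        omega
  have hsub : (gIter arr s 25).toFinset ⊆ scanList.toFinset := by
    intro q hq
    rw [List.mem_toFinset] at hq ⊢
    exact mem_scanList.mpr (valid_gIter hs 25 q hq)
  have h1 := Finset.card_le_card hsub
  have h2 := hcard 25 (le_refl _)
  rw [card_scanList_toFinset] at h1
  omega

lemma growB_gIter25_fix {arr : List (List Int)} {s : Int × Int} (hs : validP s = true) :
    growB arr (gIter arr s 25) = gIter arr s 25 := by
  obtain ⟨k, hk, hstab⟩ := exists_gIter_stab hs
  have h25 : gIter arr s 25 = gIter arr s (k + 1) := gIter_persist hstab 25 (by omega)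
  have h26 : gIter arr s 26 = gIter arr s (k + 1) := gIter_persist hstab 26 (by omega)
  calc growB arr (gIter arr s 25) = gIter arr s 26 := (gIter_succ arr s 25).symm
    _ = gIter arr s (k + 1) := h26
    _ = gIter arr s 25 := h25.symm

-- the component of s, as a finite set
def comp (arr : List (List Int)) (s : Int × Int) : Finset (Int × Int) :=
  (regionB arr s.1 s.2).toFinset

lemma comp_eq_gIter (arr : List (List Int)) (s : Int × Int) :
    comp arr s = (gIter arr s 25).toFinset := rfl

lemma mem_comp_self {arr : List (List Int)} {s : Int × Int} (hs : validP s = true) :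
    s ∈ comp arr s := by
  rw [comp_eq_gIter, List.mem_toFinset]; exact mem_self_gIter hs 25

lemma valid_comp {arr : List (List Int)} {s p : Int × Int} (hs : validP s = true)
    (hp : p ∈ comp arr s) : validP p = true := by
  rw [comp_eq_gIter, List.mem_toFinset] at hp
  exact valid_gIter hs 25 p hp

lemma comp_closed {arr : List (List Int)} {s : Int × Int} (hs : validP s = true) :
    ClosedF arr (comp arr s) := by
  intro p hp q hq
  rw [comp_eq_gIter, List.mem_toFinset] at hp ⊢
  have : q ∈ growB arr (gIter arr s 25) :=
    (mem_growB' (valid_gIter hs 25)).mpr (Or.inr ⟨p, hp, hq⟩)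
  rwa [growB_gIter25_fix hs] at this

lemma comp_min {arr : List (List Int)} {s : Int × Int} {T : Finset (Int × Int)}
    (hs : validP s = true) (hsT : s ∈ T) (hTc : ClosedF arr T) :
    comp arr s ⊆ T := by
  have : ∀ k, ∀ p ∈ gIter arr s k, p ∈ T := by
    intro k
    induction k with
    | zero => intro p hp; simp [gIter] at hp; subst hp; exact hsT
    | succ k ih =>
        intro p hp
        rw [gIter_succ] at hp
        rcases (mem_growB' (valid_gIter hs k)).mp hp with h | ⟨q, hq, hstep⟩
        · exact ih p h
        · exact hTc q (ih q hq) p hstep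
  intro p hp
  rw [comp_eq_gIter, List.mem_toFinset] at hp
  exact this 25 p hp

lemma cellVal_comp {arr : List (List Int)} {s p : Int × Int} (hs : validP s = true)
    (hp : p ∈ comp arr s) : cellVal arr p.1 p.2 = cellVal arr s.1 s.2 := by
  have hsub : comp arr s ⊆ (comp arr s).filter
      (fun q => cellVal arr q.1 q.2 = cellVal arr s.1 s.2) := by
    refine comp_min hs ?_ ?_
    · exact Finset.mem_filter.mpr ⟨mem_comp_self hs, rfl⟩
    · intro q hq r hr
      rw [Finset.mem_filter] at hq ⊢
      refine ⟨comp_closed hs q hq.1 r hr, ?_⟩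
      rw [(stepOK_iff.mp hr).2.2.2, hq.2]
  exact (Finset.mem_filter.mp (hsub hp)).2

lemma comp_symm {arr : List (List Int)} {s q : Int × Int} (hs : validP s = true)
    (hq : q ∈ comp arr s) : s ∈ comp arr q := by
  have hsub : comp arr s ⊆ (comp arr s).filter (fun p => s ∈ comp arr p) := by
    refine comp_min hs (Finset.mem_filter.mpr ⟨mem_comp_self hs, mem_comp_self hs⟩) ?_
    intro p hp r hr
    rw [Finset.mem_filter] at hp ⊢
    have hvr : validP r = true := stepOK_validq hr
    have hvp : validP p = true := valid_comp hs hp.1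
    refine ⟨comp_closed hs p hp.1 r hr, ?_⟩
    have hpr : p ∈ comp arr r :=
      comp_closed hvr r (mem_comp_self hvr) p (stepOK_symm hr)
    exact comp_min hvp hpr (comp_closed hvr) hp.2
  exact (Finset.mem_filter.mp (hsub hq)).2

lemma comp_eq_of_mem {arr : List (List Int)} {s q : Int × Int} (hs : validP s = true)
    (hq : q ∈ comp arr s) : comp arr q = comp arr s := by
  have hvq : validP q = true := valid_comp hs hq
  refine Finset.Subset.antisymm ?_ ?_
  · exact comp_min hvq hq (comp_closed hs)
  · exact comp_min hs (comp_symm hs hq) (comp_closed hvq)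

lemma nodup_regionB (arr : List (List Int)) (x y : Int) : (regionB arr x y).Nodup := by
  rw [regionB_eq_gIter]
  rw [show (25 : Nat) = 24 + 1 from rfl, gIter_succ]
  exact nodup_growB _ _

lemma length_regionB (arr : List (List Int)) (x y : Int) :
    (regionB arr x y).length = (comp arr (x, y)).card := by
  rw [comp_eq_gIter, ← regionB_eq_gIter]
  exact (List.toFinset_card_of_nodup (nodup_regionB arr x y)).symm


-- ---------- A-side: the visited matrix as a finite set ----------

def Shape (vis : List (List Bool)) : Prop := vis.length = 5 ∧ ∀ r ∈ vis, r.length = 5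

def Vf (vis : List (List Bool)) : Finset (Int × Int) :=
  scanList.toFinset.filter (fun p => vget vis p.1 p.2 = true)

lemma mem_Vf {vis : List (List Bool)} {p : Int × Int} :
    p ∈ Vf vis ↔ validP p = true ∧ vget vis p.1 p.2 = true := by
  simp [Vf, Finset.mem_filter, List.mem_toFinset, mem_scanList]

lemma shape_init : Shape (List.replicate 5 (List.replicate 5 false)) := by
  constructor
  · rfl
  · intro r hr; rw [List.eq_of_mem_replicate hr]; rfl

lemma Vf_init : Vf (List.replicate 5 (List.replicate 5 false)) = ∅ := by decide

lemma shape_vset {vis : List (List Bool)} (h : Shape vis) {x y : Int}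
    (hv : validP (x, y) = true) : Shape (vset vis x y) := by
  obtain ⟨hl, hr⟩ := h
  simp only [validP, isValid, Bool.and_eq_true, decide_eq_true_eq] at hv
  constructor
  · simp [vset, hl]
  · intro r hrm
    rcases List.mem_or_eq_of_mem_set hrm with hold | hnew
    · exact hr r hold
    · subst hnew
      rw [List.length_set]
      have hy : y.toNat < vis.length := by omega
      rw [List.getD_eq_getElem vis [] hy]
      exact hr _ (List.getElem_mem hy)

lemma vget_vset {vis : List (List Bool)} (h : Shape vis) {x y a b : Int}
    (hv : validP (x, y) = true) (hv2 : validP (a, b) = true) :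
    vget (vset vis x y) a b = if a = x ∧ b = y then true else vget vis a b := by
  obtain ⟨hl, hr⟩ := h
  simp only [validP, isValid, Bool.and_eq_true, decide_eq_true_eq] at hv hv2
  have hy : y.toNat < vis.length := by omega
  have hrowlen : (vis.getD y.toNat []).length = 5 := by
    rw [List.getD_eq_getElem vis [] hy]
    exact hr _ (List.getElem_mem hy)
  by_cases hb : b = y
  · subst hb
    have houter : (vset vis x b).getD b.toNat [] = (vis.getD b.toNat []).set x.toNat true := by
      simp [vset, List.getD_eq_getElem?_getD, hy]
    rw [vget, houter]
    by_cases ha : a = x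
    · subst ha
      rw [if_pos ⟨rfl, rfl⟩]
      have hlt : a.toNat < (vis[b.toNat]?.getD []).length := by
        rw [← List.getD_eq_getElem?_getD]; omega
      simp [List.getD_eq_getElem?_getD, hlt]
    · have : ¬(a = x ∧ b = b) := by tauto
      rw [if_neg this, vget]
      have han : a.toNat ≠ x.toNat := by omega
      simp [List.getD_eq_getElem?_getD, List.getElem?_set_ne (Ne.symm han)]
  · have hbn : y.toNat ≠ b.toNat := by omega
    have houter : (vset vis x y).getD b.toNat [] = vis.getD b.toNat [] := by
      simp [vset, List.getD_eq_getElem?_getD, List.getElem?_set_ne hbn]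
    have : ¬(a = x ∧ b = y) := by tauto
    rw [if_neg this, vget, houter, vget]

lemma Vf_vset {vis : List (List Bool)} (h : Shape vis) {x y : Int}
    (hv : validP (x, y) = true) : Vf (vset vis x y) = insert (x, y) (Vf vis) := by
  ext p
  obtain ⟨a, b⟩ := p
  rw [mem_Vf, Finset.mem_insert, mem_Vf]
  constructor
  · rintro ⟨hvp, hg⟩
    rw [vget_vset h hv hvp] at hg
    by_cases hab : a = x ∧ b = y
    · exact Or.inl (by rw [Prod.mk.injEq]; exact hab)
    · rw [if_neg hab] at hg; exact Or.inr ⟨hvp, hg⟩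
  · rintro (heq | ⟨hvp, hg⟩)
    · rw [Prod.mk.injEq] at heq
      refine ⟨by rw [heq.1, heq.2]; exact hv, ?_⟩
      rw [vget_vset h hv (by rw [heq.1, heq.2]; exact hv), if_pos heq]
    · refine ⟨hvp, ?_⟩
      rw [vget_vset h hv hvp]
      split <;> simp [hg]

-- number of unvisited cells
def unvisC (vis : List (List Bool)) : Nat := (scanList.toFinset \ Vf vis).card

lemma unvisC_le : ∀ vis, unvisC vis ≤ 25 := by
  intro vis
  calc (scanList.toFinset \ Vf vis).card ≤ scanList.toFinset.card :=
        Finset.card_le_card (Finset.sdiff_subset)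
    _ = 25 := card_scanList_toFinset

lemma unvisC_vset {vis : List (List Bool)} (h : Shape vis) {x y : Int}
    (hv : validP (x, y) = true) (hnv : vget vis x y = false) :
    unvisC (vset vis x y) + 1 = unvisC vis := by
  have hmem : (x, y) ∈ scanList.toFinset \ Vf vis := by
    rw [Finset.mem_sdiff, List.mem_toFinset, mem_scanList, mem_Vf]
    exact ⟨hv, by simp [hnv]⟩
  rw [unvisC, Vf_vset h hv, Finset.sdiff_insert, Finset.card_erase_of_mem hmem]
  have : 0 < (scanList.toFinset \ Vf vis).card := Finset.card_pos.mpr ⟨_, hmem⟩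
  unfold unvisC
  omega

-- ---------- A-side: the BFS loop invariant ----------

structure BfsInv (arr : List (List Int)) (s : Int × Int) (V0 : Finset (Int × Int))
    (exempt : Option (Int × Int)) (q : List (Int × Int)) (vis : List (List Bool))
    (conn : List (Int × Int)) : Prop where
  shape : Shape vis
  nodup : conn.Nodup
  connSet : ∀ p, p ∈ conn ↔ p ∈ Vf vis ∧ p ∉ V0
  qconn : ∀ p ∈ q, p ∈ conn
  sIn : s ∈ conn
  sound : ∀ p ∈ conn, p ∈ comp arr s
  closedEx : ∀ p ∈ conn, p ∉ q → (∀ e, exempt = some e → p ≠ e) →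
    ∀ r, stepOK arr p r = true → r ∈ Vf vis
  v0sub : V0 ⊆ Vf vis

lemma nbrs_cases {a b : Int} {r : Int × Int} (h : r ∈ nbrs a b) :
    r = (a + (0:Int), b + (1:Int)) ∨ r = (a + 1, b + (0:Int)) ∨
      r = (a + (0:Int), b + (-1:Int)) ∨ r = (a + (-1:Int), b + (0:Int)) := by
  obtain ⟨c, d⟩ := r
  simp only [nbrs, List.mem_cons, List.not_mem_nil, or_false, Prod.mk.injEq] at h
  simp only [Prod.mk.injEq]
  omega

-- one direction of the `for i in range(4)` body
lemma visit_step {arr : List (List Int)} {s : Int × Int} {V0 : Finset (Int × Int)}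
    {p₀ : Int × Int} (hs : validP s = true) (hp₀ : p₀ ∈ comp arr s)
    (st : List (Int × Int) × List (List Bool) × List (Int × Int))
    (h : BfsInv arr s V0 (some p₀) st.1 st.2.1 st.2.2)
    (nx ny : Int) (hn : (nx, ny) ∈ nbrs p₀.1 p₀.2)
    (st' : List (Int × Int) × List (List Bool) × List (Int × Int))
    (hst : st' = if isValid nx ny && !(vget st.2.1 nx ny) &&
        (cellVal arr nx ny == cellVal arr s.1 s.2) then
        (st.1 ++ [(nx, ny)], vset st.2.1 nx ny, st.2.2 ++ [(nx, ny)])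
      else st) :
    BfsInv arr s V0 (some p₀) st'.1 st'.2.1 st'.2.2 ∧
      (∀ p, p ∈ Vf st.2.1 → p ∈ Vf st'.2.1) ∧
      (stepOK arr p₀ (nx, ny) = true → (nx, ny) ∈ Vf st'.2.1) ∧
      2 * unvisC st'.2.1 + st'.1.length ≤ 2 * unvisC st.2.1 + st.1.length := by
  obtain ⟨q, vis, conn⟩ := st
  simp only at h hst ⊢
  have hval : cellVal arr p₀.1 p₀.2 = cellVal arr s.1 s.2 := cellVal_comp hs hp₀
  by_cases hg : (isValid nx ny && !(vget vis nx ny) &&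
      (cellVal arr nx ny == cellVal arr s.1 s.2)) = true
  · rw [if_pos hg] at hst
    simp only [Bool.and_eq_true, Bool.not_eq_true', beq_iff_eq] at hg
    obtain ⟨⟨hA, hB⟩, hC⟩ := hg
    have hvn : validP (nx, ny) = true := hA
    have hnotV : (nx, ny) ∉ Vf vis := by
      rw [mem_Vf]; rintro ⟨-, hgt⟩; rw [hB] at hgt; exact absurd hgt (by simp)
    have hnstep : stepOK arr p₀ (nx, ny) = true :=
      stepOK_iff.mpr ⟨valid_comp hs hp₀, hvn, hn, hC.trans hval.symm⟩
    have hnc : (nx, ny) ∈ comp arr s := comp_closed hs p₀ hp₀ _ hnstep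
    have hVf' : Vf (vset vis nx ny) = insert (nx, ny) (Vf vis) := Vf_vset h.shape hvn
    have hnconn : (nx, ny) ∉ conn := fun hmem => hnotV ((h.connSet _).mp hmem).1
    have hnV0 : (nx, ny) ∉ V0 := fun hmem => hnotV (h.v0sub hmem)
    subst hst
    refine ⟨⟨shape_vset h.shape hvn, ?_, ?_, ?_, ?_, ?_, ?_, ?_⟩, ?_, ?_, ?_⟩
    · exact h.nodup.append (List.nodup_singleton _)
        (fun a ha hb => hnconn (List.mem_singleton.mp hb ▸ ha))
    · intro p
      simp only [List.mem_append, List.mem_singleton, hVf', Finset.mem_insert]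
      constructor
      · rintro (hp | rfl)
        · obtain ⟨h1, h2⟩ := (h.connSet p).mp hp; exact ⟨Or.inr h1, h2⟩
        · exact ⟨Or.inl rfl, hnV0⟩
      · rintro ⟨rfl | h1, h2⟩
        · exact Or.inr rfl
        · exact Or.inl ((h.connSet p).mpr ⟨h1, h2⟩)
    · intro p hp
      simp only [List.mem_append, List.mem_singleton] at hp ⊢
      rcases hp with hp | rfl
      · exact Or.inl (h.qconn p hp)
      · exact Or.inr rfl
    · exact List.mem_append_left _ h.sIn
    · intro p hp
      rcases List.mem_append.mp hp with hp | hp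
      · exact h.sound p hp
      · rw [List.mem_singleton.mp hp]; exact hnc
    · intro p hp hnq hne r hr
      rcases List.mem_append.mp hp with hp | hp
      · have : p ∉ q := fun hq => hnq (List.mem_append_left _ hq)
        have := h.closedEx p hp this hne r hr
        rw [hVf']; exact Finset.mem_insert_of_mem this
      · exact absurd (List.mem_append_right _ hp) hnq
    · intro p hp; rw [hVf']; exact Finset.mem_insert_of_mem (h.v0sub hp)
    · intro p hp; rw [hVf']; exact Finset.mem_insert_of_mem hp
    · intro _; rw [hVf']; exact Finset.mem_insert_self _ _
    · have := unvisC_vset h.shape hvn hB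
      simp only [List.length_append, List.length_singleton]
      omega
  · rw [if_neg hg] at hst
    subst hst
    refine ⟨h, fun p hp => hp, ?_, Nat.le.refl⟩
    intro hstep
    rw [stepOK_iff] at hstep
    obtain ⟨hvp, hvn, -, hcv⟩ := hstep
    have hC : (cellVal arr nx ny == cellVal arr s.1 s.2) = true := by
      rw [beq_iff_eq]; exact hcv.trans hval
    have hA : isValid nx ny = true := hvn
    cases hvg : vget vis nx ny with
    | true => exact mem_Vf.mpr ⟨hvn, hvg⟩
    | false => exact absurd (by simp [hA, hC, hvg]) hg

-- folding any list of directions of the popped cell p₀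
lemma visitFold_spec {arr : List (List Int)} {s : Int × Int} {V0 : Finset (Int × Int)}
    {p₀ : Int × Int} (hs : validP s = true) (hp₀ : p₀ ∈ comp arr s) :
    ∀ (ds : List (Int × Int)),
      (∀ d ∈ ds, (p₀.1 + d.1, p₀.2 + d.2) ∈ nbrs p₀.1 p₀.2) →
      ∀
      (st : List (Int × Int) × List (List Bool) × List (Int × Int)),
      BfsInv arr s V0 (some p₀) st.1 st.2.1 st.2.2 →
      (BfsInv arr s V0 (some p₀)
          (ds.foldl (fun st d =>
            if isValid (p₀.1 + d.1) (p₀.2 + d.2) && !(vget st.2.1 (p₀.1 + d.1) (p₀.2 + d.2)) &&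
                (cellVal arr (p₀.1 + d.1) (p₀.2 + d.2) == cellVal arr s.1 s.2) then
              (st.1 ++ [(p₀.1 + d.1, p₀.2 + d.2)], vset st.2.1 (p₀.1 + d.1) (p₀.2 + d.2),
                st.2.2 ++ [(p₀.1 + d.1, p₀.2 + d.2)])
            else st) st).1
          (ds.foldl (fun st d =>
            if isValid (p₀.1 + d.1) (p₀.2 + d.2) && !(vget st.2.1 (p₀.1 + d.1) (p₀.2 + d.2)) &&
                (cellVal arr (p₀.1 + d.1) (p₀.2 + d.2) == cellVal arr s.1 s.2) then
              (st.1 ++ [(p₀.1 + d.1, p₀.2 + d.2)], vset st.2.1 (p₀.1 + d.1) (p₀.2 + d.2),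
                st.2.2 ++ [(p₀.1 + d.1, p₀.2 + d.2)])
            else st) st).2.1
          (ds.foldl (fun st d =>
            if isValid (p₀.1 + d.1) (p₀.2 + d.2) && !(vget st.2.1 (p₀.1 + d.1) (p₀.2 + d.2)) &&
                (cellVal arr (p₀.1 + d.1) (p₀.2 + d.2) == cellVal arr s.1 s.2) then
              (st.1 ++ [(p₀.1 + d.1, p₀.2 + d.2)], vset st.2.1 (p₀.1 + d.1) (p₀.2 + d.2),
                st.2.2 ++ [(p₀.1 + d.1, p₀.2 + d.2)])
            else st) st).2.2) ∧
      (∀ p, p ∈ Vf st.2.1 → p ∈ Vf (ds.foldl (fun st d =>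
            if isValid (p₀.1 + d.1) (p₀.2 + d.2) && !(vget st.2.1 (p₀.1 + d.1) (p₀.2 + d.2)) &&
                (cellVal arr (p₀.1 + d.1) (p₀.2 + d.2) == cellVal arr s.1 s.2) then
              (st.1 ++ [(p₀.1 + d.1, p₀.2 + d.2)], vset st.2.1 (p₀.1 + d.1) (p₀.2 + d.2),
                st.2.2 ++ [(p₀.1 + d.1, p₀.2 + d.2)])
            else st) st).2.1) ∧
      (∀ d ∈ ds, stepOK arr p₀ (p₀.1 + d.1, p₀.2 + d.2) = true →
        (p₀.1 + d.1, p₀.2 + d.2) ∈ Vf (ds.foldl (fun st d =>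
            if isValid (p₀.1 + d.1) (p₀.2 + d.2) && !(vget st.2.1 (p₀.1 + d.1) (p₀.2 + d.2)) &&
                (cellVal arr (p₀.1 + d.1) (p₀.2 + d.2) == cellVal arr s.1 s.2) then
              (st.1 ++ [(p₀.1 + d.1, p₀.2 + d.2)], vset st.2.1 (p₀.1 + d.1) (p₀.2 + d.2),
                st.2.2 ++ [(p₀.1 + d.1, p₀.2 + d.2)])
            else st) st).2.1) ∧
      2 * unvisC (ds.foldl (fun st d =>
            if isValid (p₀.1 + d.1) (p₀.2 + d.2) && !(vget st.2.1 (p₀.1 + d.1) (p₀.2 + d.2)) &&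
                (cellVal arr (p₀.1 + d.1) (p₀.2 + d.2) == cellVal arr s.1 s.2) then
              (st.1 ++ [(p₀.1 + d.1, p₀.2 + d.2)], vset st.2.1 (p₀.1 + d.1) (p₀.2 + d.2),
                st.2.2 ++ [(p₀.1 + d.1, p₀.2 + d.2)])
            else st) st).2.1 + (ds.foldl (fun st d =>
            if isValid (p₀.1 + d.1) (p₀.2 + d.2) && !(vget st.2.1 (p₀.1 + d.1) (p₀.2 + d.2)) &&
                (cellVal arr (p₀.1 + d.1) (p₀.2 + d.2) == cellVal arr s.1 s.2) then
              (st.1 ++ [(p₀.1 + d.1, p₀.2 + d.2)], vset st.2.1 (p₀.1 + d.1) (p₀.2 + d.2),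
                st.2.2 ++ [(p₀.1 + d.1, p₀.2 + d.2)])
            else st) st).1.length ≤ 2 * unvisC st.2.1 + st.1.length := by
  intro ds
  induction ds with
  | nil => intro _ st h; exact ⟨h, fun p hp => hp, fun d hd => absurd hd (List.not_mem_nil), Nat.le.refl⟩
  | cons d ds ih =>
      intro hds st h
      obtain ⟨h1, hm1, hc1, hme1⟩ :=
        visit_step hs hp₀ st h (p₀.1 + d.1) (p₀.2 + d.2) (hds d (by simp)) _ rfl
      rw [List.foldl_cons]
      obtain ⟨h2, hm2, hc2, hme2⟩ := ih (fun e he => hds e (by simp [he])) _ h1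
      refine ⟨h2, fun p hp => hm2 p (hm1 p hp), ?_, by omega⟩
      intro e he hstep
      rcases List.mem_cons.mp he with rfl | he'
      · exact hm2 _ (hc1 hstep)
      · exact hc2 e he' hstep

-- the whole 4-direction body
lemma visitDirs_spec {arr : List (List Int)} {s : Int × Int} {V0 : Finset (Int × Int)}
    {p₀ : Int × Int} (hs : validP s = true) (hp₀ : p₀ ∈ comp arr s)
    {q : List (Int × Int)} {vis : List (List Bool)} {conn : List (Int × Int)}
    (h : BfsInv arr s V0 (some p₀) q vis conn) :
    BfsInv arr s V0 none (visitDirs arr (cellVal arr s.1 s.2) p₀.1 p₀.2 (q, vis, conn)).1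
        (visitDirs arr (cellVal arr s.1 s.2) p₀.1 p₀.2 (q, vis, conn)).2.1
        (visitDirs arr (cellVal arr s.1 s.2) p₀.1 p₀.2 (q, vis, conn)).2.2 ∧
      2 * unvisC (visitDirs arr (cellVal arr s.1 s.2) p₀.1 p₀.2 (q, vis, conn)).2.1 +
          (visitDirs arr (cellVal arr s.1 s.2) p₀.1 p₀.2 (q, vis, conn)).1.length ≤
        2 * unvisC vis + q.length := by
  have hds : ∀ d ∈ dirsA, (p₀.1 + d.1, p₀.2 + d.2) ∈ nbrs p₀.1 p₀.2 := by
    intro d hd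
    rcases (by simpa [dirsA] using hd :
        d = ((0 : Int), (1 : Int)) ∨ d = (1, 0) ∨ d = (0, -1) ∨ d = (-1, 0)) with
      rfl | rfl | rfl | rfl <;> simp [nbrs, Prod.ext_iff] <;> omega
  obtain ⟨h', hmono, hcov, hmeas⟩ := visitFold_spec hs hp₀ dirsA hds (q, vis, conn) h
  refine ⟨⟨h'.shape, h'.nodup, h'.connSet, h'.qconn, h'.sIn, h'.sound, ?_, h'.v0sub⟩, hmeas⟩
  intro p hp hnq _ r hr
  by_cases hpe : p = p₀
  · subst hpe
    have hrn : r ∈ nbrs p.1 p.2 := (stepOK_iff.mp hr).2.2.1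
    rcases nbrs_cases hrn with rfl | rfl | rfl | rfl
    · exact hcov (0, 1) (by norm_num [dirsA]) hr
    · exact hcov (1, 0) (by norm_num [dirsA]) hr
    · exact hcov (0, -1) (by norm_num [dirsA]) hr
    · exact hcov (-1, 0) (by norm_num [dirsA]) hr
  · exact h'.closedEx p hp hnq (fun e he => by cases he; exact hpe) r hr

lemma bfsLoop_spec {arr : List (List Int)} {s : Int × Int} {V0 : Finset (Int × Int)}
    (hs : validP s = true) :
    ∀ (fuel : Nat) (q : List (Int × Int)) (vis : List (List Bool)) (conn : List (Int × Int)),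
      BfsInv arr s V0 none q vis conn →
      2 * unvisC vis + q.length ≤ fuel →
      BfsInv arr s V0 none []
        (bfsLoop arr (cellVal arr s.1 s.2) fuel q vis conn).1
        (bfsLoop arr (cellVal arr s.1 s.2) fuel q vis conn).2 := by
  intro fuel
  induction fuel with
  | zero =>
      intro q vis conn h hm
      have hq : q = [] := by
        cases q with
        | nil => rfl
        | cons a t => simp at hm
      subst hq
      simpa [bfsLoop] using h
  | succ f ih =>
      intro q vis conn h hm
      cases q with
      | nil => simpa [bfsLoop] using h
      | cons p₀ rest =>
          obtain ⟨cx, cy⟩ := p₀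
          rw [bfsLoop]
          have hpop : BfsInv arr s V0 (some (cx, cy)) rest vis conn := by
            refine ⟨h.shape, h.nodup, h.connSet, fun p hp => h.qconn p (by simp [hp]),
              h.sIn, h.sound, ?_, h.v0sub⟩
            intro p hp hnr hne r hr
            refine h.closedEx p hp ?_ (fun e he => nomatch he) r hr
            simp only [List.mem_cons, not_or]
            exact ⟨hne (cx, cy) rfl, hnr⟩
          have hp₀c : (cx, cy) ∈ comp arr s := h.sound _ (h.qconn _ (by simp))
          obtain ⟨hinv', hmeas⟩ := visitDirs_spec hs hp₀c hpop
          simp only at hinv' hmeas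
          refine ih _ _ _ hinv' ?_
          simp only [List.length_cons] at hm
          omega

-- ---------- A-side: specification of one bfs call ----------

lemma bfsA_spec {arr : List (List Int)} {x y : Int} {vis : List (List Bool)}
    (h : Shape vis) (hcl : ClosedF arr (Vf vis)) (hv : validP (x, y) = true)
    (hnv : vget vis x y = false) :
    ∃ vis' conn,
      bfsA arr x y vis = (vis', if 3 ≤ conn.length then some conn else none) ∧
      Shape vis' ∧ Vf vis' = Vf vis ∪ comp arr (x, y) ∧ ClosedF arr (Vf vis') ∧
      conn.length = (comp arr (x, y)).card := by
  have hsV0 : (x, y) ∉ Vf vis := by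
    rw [mem_Vf]; rintro ⟨-, hgt⟩; rw [hnv] at hgt; exact absurd hgt (by simp)
  have hVf1 : Vf (vset vis x y) = insert (x, y) (Vf vis) := Vf_vset h hv
  have hinv0 : BfsInv arr (x, y) (Vf vis) none [(x, y)] (vset vis x y) [(x, y)] := by
    refine ⟨shape_vset h hv, List.nodup_singleton _, ?_, fun p hp => hp, by simp, ?_, ?_, ?_⟩
    · intro p
      rw [List.mem_singleton, hVf1, Finset.mem_insert]
      constructor
      · rintro rfl; exact ⟨Or.inl rfl, hsV0⟩
      · rintro ⟨rfl | hp, hnp⟩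
        · rfl
        · exact absurd hp hnp
    · intro p hp; rw [List.mem_singleton.mp hp]; exact mem_comp_self hv
    · intro p hp hnq _ r hr
      exact absurd (by rw [List.mem_singleton.mp hp]; simp) hnq
    · rw [hVf1]; exact fun z hz => Finset.mem_insert_of_mem hz
  have hmeas : 2 * unvisC (vset vis x y) + ([(x, y)] : List (Int × Int)).length ≤ 64 := by
    have := unvisC_le (vset vis x y)
    simp only [List.length_singleton]
    omega
  have hfin := bfsLoop_spec (V0 := Vf vis) hv 64 [(x, y)] (vset vis x y) [(x, y)] hinv0 hmeas
  simp only at hfin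
  set r := bfsLoop arr (cellVal arr x y) 64 [(x, y)] (vset vis x y) [(x, y)] with hr
  have hclosed' : ClosedF arr (Vf r.1) := by
    intro p hp z hz
    by_cases hp0 : p ∈ Vf vis
    · exact hfin.v0sub (hcl p hp0 z hz)
    · have hpc : p ∈ r.2 := (hfin.connSet p).mpr ⟨hp, hp0⟩
      exact hfin.closedEx p hpc (List.not_mem_nil) (fun e he => nomatch he) z hz
  have hsin' : (x, y) ∈ Vf r.1 ∧ (x, y) ∉ Vf vis := (hfin.connSet _).mp hfin.sIn
  have hcompsub : comp arr (x, y) ⊆ Vf r.1 := comp_min hv hsin'.1 hclosed'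
  have hdisj : ∀ z ∈ comp arr (x, y), z ∉ Vf vis := by
    intro z hz hzV0
    have hvz : validP z = true := valid_comp hv hz
    have : (x, y) ∈ Vf vis := comp_min hvz hzV0 hcl (comp_symm hv hz)
    exact hsV0 this
  have htofin : r.2.toFinset = comp arr (x, y) := by
    ext z
    rw [List.mem_toFinset]
    constructor
    · exact hfin.sound z
    · intro hz
      exact (hfin.connSet z).mpr ⟨hcompsub hz, hdisj z hz⟩
  have hlen : r.2.length = (comp arr (x, y)).card := by
    rw [← htofin, List.toFinset_card_of_nodup hfin.nodup]
  have hVf' : Vf r.1 = Vf vis ∪ comp arr (x, y) := by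
    ext z
    rw [Finset.mem_union]
    constructor
    · intro hz
      by_cases hz0 : z ∈ Vf vis
      · exact Or.inl hz0
      · exact Or.inr (hfin.sound z ((hfin.connSet z).mpr ⟨hz, hz0⟩))
    · rintro (hz | hz)
      · exact hfin.v0sub hz
      · exact hcompsub hz
  exact ⟨r.1, r.2, rfl, hfin.shape, hVf', hclosed', hlen⟩

-- ---------- outer loops ----------

-- the body of A's outer double loop, as a function of the scanned cell
def FA (arr : List (List Int)) (st : Int × List (List Bool)) (p : Int × Int) :
    Int × List (List Bool) :=
  if !(vget st.2 p.1 p.2) then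
    let r := bfsA arr p.1 p.2 st.2
    match r.2 with
    | some c => (st.1 + (c.length : Int), r.1)
    | none => (st.1, r.1)
  else st

lemma evalA_eq (arr : List (List Int)) :
    evaluate_artifacts arr =
      (scanList.foldl (FA arr) (0, List.replicate 5 (List.replicate 5 false))).1 := by
  rw [evaluate_artifacts, scanList, List.foldl_flatMap]
  simp only [List.foldl_map]
  rfl

lemma evalB_eq (arr : List (List Int)) :
    evaluate_artifacts_alt arr =
      scanList.foldl (fun acc p =>
        acc + (if 3 ≤ (regionB arr p.1 p.2).length then 1 else 0)) 0 := by
  rw [evaluate_artifacts_alt, scanList, List.foldl_flatMap]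
  simp only [List.foldl_map]

lemma comp_disjoint_closed {arr : List (List Int)} {V : Finset (Int × Int)} {p : Int × Int}
    (hcl : ClosedF arr V) (hv : validP p = true) (hnp : p ∉ V) :
    ∀ z ∈ comp arr p, z ∉ V := by
  intro z hz hzV
  exact hnp (comp_min (valid_comp hv hz) hzV hcl (comp_symm hv hz))

lemma filter_union_comp {arr : List (List Int)} {V : Finset (Int × Int)} {p : Int × Int}
    (hv : validP p = true) (hdisj : ∀ z ∈ comp arr p, z ∉ V) :
    (((V ∪ comp arr p).filter (fun z => 3 ≤ (comp arr z).card)).card : Int) =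
      ((V.filter (fun z => 3 ≤ (comp arr z).card)).card : Int) +
        (if 3 ≤ (comp arr p).card then ((comp arr p).card : Int) else 0) := by
  rw [Finset.filter_union, Finset.card_union_of_disjoint]
  · have hcf : (comp arr p).filter (fun z => 3 ≤ (comp arr z).card) =
        if 3 ≤ (comp arr p).card then comp arr p else ∅ := by
      by_cases hbig : 3 ≤ (comp arr p).card
      · rw [if_pos hbig]
        refine Finset.filter_true_of_mem ?_
        intro z hz
        rw [comp_eq_of_mem hv hz]
        exact hbig
      · rw [if_neg hbig]
        refine Finset.filter_false_of_mem ?_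
        intro z hz
        rw [comp_eq_of_mem hv hz]
        exact hbig
    rw [hcf]
    by_cases hbig : 3 ≤ (comp arr p).card
    · rw [if_pos hbig, if_pos hbig]; push_cast; ring
    · rw [if_neg hbig, if_neg hbig]; simp
  · refine Finset.disjoint_filter_filter ?_
    rw [Finset.disjoint_right]
    intro z hz
    exact hdisj z hz

lemma outer_loop (arr : List (List Int)) :
    ∀ (l : List (Int × Int)), (∀ p ∈ l, validP p = true) →
    ∀ (count : Int) (vis : List (List Bool)), Shape vis → ClosedF arr (Vf vis) →
      count = (((Vf vis).filter (fun z => 3 ≤ (comp arr z).card)).card : Int) →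
      Shape (l.foldl (FA arr) (count, vis)).2 ∧
      ClosedF arr (Vf (l.foldl (FA arr) (count, vis)).2) ∧
      (∀ p, p ∈ Vf vis → p ∈ Vf (l.foldl (FA arr) (count, vis)).2) ∧
      (∀ p ∈ l, p ∈ Vf (l.foldl (FA arr) (count, vis)).2) ∧
      (l.foldl (FA arr) (count, vis)).1 =
        (((Vf (l.foldl (FA arr) (count, vis)).2).filter
          (fun z => 3 ≤ (comp arr z).card)).card : Int) := by
  intro l
  induction l with
  | nil =>
      intro _ count vis hsh hcl hcount
      exact ⟨hsh, hcl, fun p hp => hp, fun p hp => absurd hp (List.not_mem_nil), hcount⟩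
  | cons p l ih =>
      intro hl count vis hsh hcl hcount
      have hvp : validP p = true := hl p (by simp)
      rw [List.foldl_cons]
      by_cases hvg : vget vis p.1 p.2 = true
      · have hFA : FA arr (count, vis) p = (count, vis) := by
          rw [FA, hvg]; rfl
        rw [hFA]
        obtain ⟨hsh', hcl', hmono, hcov, hcount'⟩ := ih (fun z hz => hl z (by simp [hz]))
          count vis hsh hcl hcount
        exact ⟨hsh', hcl', hmono, fun z hz => by
          rcases List.mem_cons.mp hz with rfl | hz'
          · exact hmono z (mem_Vf.mpr ⟨hvp, hvg⟩)
          · exact hcov z hz', hcount'⟩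
      · have hvg' : vget vis p.1 p.2 = false := by
          cases h : vget vis p.1 p.2
          · rfl
          · exact absurd h hvg
        have hv2 : validP (p.1, p.2) = true := hvp
        obtain ⟨vis', conn, heq, hsh', hVf', hcl', hlen⟩ := bfsA_spec hsh hcl hv2 hvg'
        have hnpV : p ∉ Vf vis := by
          rw [mem_Vf]; rintro ⟨-, hgt⟩; exact hvg hgt
        have hFA : FA arr (count, vis) p =
            (count + (if 3 ≤ conn.length then (conn.length : Int) else 0), vis') := by
          rw [FA]
          simp only [hvg', Bool.not_false, if_true]
          rw [heq]
          by_cases hc : 3 ≤ conn.length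
          · rw [if_pos hc, if_pos hc]
          · rw [if_neg hc, if_neg hc]
            norm_num
        rw [hFA]
        have hdisj := comp_disjoint_closed hcl hvp hnpV
        have hpe : comp arr (p.1, p.2) = comp arr p := rfl
        rw [hpe] at hVf' hlen
        have hcount' : count + (if 3 ≤ conn.length then (conn.length : Int) else 0) =
            (((Vf vis').filter (fun z => 3 ≤ (comp arr z).card)).card : Int) := by
          rw [hVf', filter_union_comp hvp hdisj, ← hcount, hlen]
        obtain ⟨hsh2, hcl2, hmono2, hcov2, hcount2⟩ := ih (fun z hz => hl z (by simp [hz]))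
          _ vis' hsh' hcl' hcount'
        refine ⟨hsh2, hcl2, ?_, ?_, hcount2⟩
        · intro z hz
          exact hmono2 z (by rw [hVf']; exact Finset.mem_union_left _ hz)
        · intro z hz
          rcases List.mem_cons.mp hz with rfl | hz'
          · exact hmono2 z (by rw [hVf']; exact Finset.mem_union_right _ (mem_comp_self hvp))
          · exact hcov2 z hz'

-- ---------- the final counting ----------

set_option maxRecDepth 8192 in
lemma Vf_final_eq {arr : List (List Int)} :
    evaluate_artifacts arr =
      ((scanList.toFinset.filter (fun z => 3 ≤ (comp arr z).card)).card : Int) := by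
  have hinit : (0 : Int) =
      (((Vf (List.replicate 5 (List.replicate 5 false))).filter
        (fun z => 3 ≤ (comp arr z).card)).card : Int) := by
    rw [Vf_init]; simp
  have hclinit : ClosedF arr (Vf (List.replicate 5 (List.replicate 5 false))) := by
    rw [Vf_init]; intro z hz; simp at hz
  obtain ⟨hsh, hcl, hmono, hcov, hcount⟩ := outer_loop arr scanList
    (fun p hp => mem_scanList.mp hp) 0 (List.replicate 5 (List.replicate 5 false))
    shape_init hclinit hinit
  have hset : Vf (scanList.foldl (FA arr) (0, List.replicate 5 (List.replicate 5 false))).2 =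
      scanList.toFinset := by
    apply Finset.Subset.antisymm
    · exact Finset.filter_subset _ _
    · intro z hz
      exact hcov z (List.mem_toFinset.mp hz)
  rw [evalA_eq, hcount, hset]

lemma evalB_count {arr : List (List Int)} :
    evaluate_artifacts_alt arr =
      ((scanList.countP (fun z => decide (3 ≤ (comp arr z).card))) : Int) := by
  rw [evalB_eq]
  have hbody : ∀ (acc : Int), ∀ p ∈ scanList,
      acc + (if 3 ≤ (regionB arr p.1 p.2).length then (1 : Int) else 0) =
      acc + (if decide (3 ≤ (comp arr p).card) = true then (1 : Int) else 0) := by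
    intro acc p _
    rw [show (regionB arr p.1 p.2).length = (comp arr p).card from length_regionB arr p.1 p.2]
    simp only [decide_eq_true_eq]
  have h1 := PySem.List.foldl_congr_mem
    (l := scanList)
    (f := fun acc p => acc + (if 3 ≤ (regionB arr p.1 p.2).length then (1 : Int) else 0))
    (g := fun acc p => acc + (if decide (3 ≤ (comp arr p).card) = true then (1 : Int) else 0))
    (init := (0 : Int)) hbody
  rw [h1, PySem.List.foldl_add scanList
      (fun p => if decide (3 ≤ (comp arr p).card) = true then (1 : Int) else 0) 0,
    PySem.List.sum_map_ite_one_zero, zero_add]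

set_option maxRecDepth 8192 in
theorem evaluate_artifacts_agree (arr : List (List Int)) :
    evaluate_artifacts arr = evaluate_artifacts_alt arr := by
  rw [Vf_final_eq, evalB_count]
  refine congrArg Nat.cast ?_
  rw [List.countP_eq_length_filter, ← List.toFinset_card_of_nodup (nodup_scanList.filter _),
    List.toFinset_filter]
  simp only [decide_eq_true_eq]

-- ===== VERDICT (by name: the statement is the Claim_ definition above) =====
theorem evaluate_artifacts_spec : Claim_equal_evaluate_artifacts := by
  intro arr _ _
  unfold Spec_evaluate_artifacts
  exact evaluate_artifacts_agree arr
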